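-- pv_equiv track=rewrite | github.com/Air2air/z-beam-generator | ai_detection/providers/winston.py | _check_uniform_structure
-- ===== SOURCE A (Python) =====
-- def _check_uniform_structure(texts: list) -> bool:
--     """Check if sentences have uniform structure (potential AI detection trigger)."""
--     if len(texts) < 2:
--         return False
--
--     # Check for similar sentence starters
--     starters = []
--     for text in texts:
--         words = text.strip().split()
--         if words:
--             starters.append(words[0].lower())
--
--     # If more than 50% of sentences start with same word, consider uniform
--     if starters:
--         most_common = max(set(starters), key=starters.count)
--         return (starters.count(most_common) / len(starters)) > 0.5
--
--     return False
-- ===== SOURCE B (Python) =====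
-- def _check_uniform_structure(texts: list) -> bool:
--     """Sort the starters, then find the mode frequency as the longest run of equal
--     adjacent elements in one scan (sorting groups duplicates contiguously)."""
--     if len(texts) < 2:
--         return False
--
--     starters = []
--     for text in texts:
--         words = text.strip().split()
--         if words:
--             starters.append(words[0].lower())
--
--     if not starters:
--         return False
--
--     starters.sort()
--     best = run = 1
--     prev = starters[0]
--     for w in starters[1:]:
--         if w == prev:
--             run += 1
--         else:
--             run = 1
--             prev = w
--         if run > best:
--             best = run
--     return best * 2 > len(starters)
-- ===== Notes on version B (the rewrite author's own statement) =====
-- stated objective: faster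
-- what changed: A finds the mode by calling max over set(starters) with key=starters.count, rescanning the list for every distinct starter; B instead sorts the starters and obtains the mode frequency as the longest run of equal adjacent elements in a single scan, comparing best*2 > len exactly.
import Mathlib
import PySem

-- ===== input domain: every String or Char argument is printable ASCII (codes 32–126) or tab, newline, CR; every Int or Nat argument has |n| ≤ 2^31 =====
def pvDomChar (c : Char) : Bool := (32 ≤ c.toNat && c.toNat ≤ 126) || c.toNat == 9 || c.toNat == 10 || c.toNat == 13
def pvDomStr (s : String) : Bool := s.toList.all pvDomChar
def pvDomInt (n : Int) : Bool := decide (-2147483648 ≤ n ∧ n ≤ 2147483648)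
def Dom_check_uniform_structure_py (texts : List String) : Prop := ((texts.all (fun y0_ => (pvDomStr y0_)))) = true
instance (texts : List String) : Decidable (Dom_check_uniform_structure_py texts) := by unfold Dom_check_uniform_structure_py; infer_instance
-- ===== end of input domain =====

-- B replaces A's max(set, key=list.count) rescans by sorting the starters and taking the
-- longest run of equal adjacent elements as the mode frequency (faster).
-- The float comparison count/len > 0.5 is ported exactly as 2*count > len (exact for list-sized integers).

-- ===== PORT A =====
def check_uniform_structure_py (texts : List String) : Bool :=
  if texts.length < 2 then false
  else
    -- starters = []; for text in texts: words = text.strip().split(); if words: starters.append(words[0].lower())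
    let starters := texts.foldl (fun acc t =>
      match PySem.Str.split₀ (PySem.Str.strip t) with
      | [] => acc
      | w :: _ => acc ++ [PySem.Str.lower w]) []
    if starters.isEmpty then false
    else
      -- most_common = max(set(starters), key=starters.count)  (only its count is used below,
      -- so Python's arbitrary set iteration order on ties cannot affect the result)
      match PySem.List.max? (PySem.Set.ofList starters) (fun w => (starters.count w : Int)) with
      | some m => decide ((starters.count m : Int) * 2 > (starters.length : Int))
      | none => false

-- ===== PORT B =====
def check_uniform_structure_py_alt (texts : List String) : Bool :=
  if texts.length < 2 then false
  else
    let starters := texts.foldl (fun acc t =>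
      match PySem.Str.split₀ (PySem.Str.strip t) with
      | [] => acc
      | w :: _ => acc ++ [PySem.Str.lower w]) []
    -- if not starters: return False; starters.sort(); run-scan for the longest run
    match PySem.List.sorted starters (fun x => x) false with
    | [] => false
    | p :: rest =>
      let st := rest.foldl (fun (s : Int × Int × String) w =>
        let run := if w = s.2.2 then s.2.1 + 1 else 1
        let prev := if w = s.2.2 then s.2.2 else w
        (if run > s.1 then run else s.1, run, prev)) (1, 1, p)
      decide (st.1 * 2 > ((p :: rest).length : Int))

-- ===== PRECONDITION & SPEC =====
def Spec_check_uniform_structure_py (texts : List String) (out : Bool) : Prop := out = check_uniform_structure_py_alt texts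
instance (texts : List String) (out : Bool) : Decidable (Spec_check_uniform_structure_py texts out) := by unfold Spec_check_uniform_structure_py; infer_instance

-- ===== CLAIM =====
def Claim_equal_check_uniform_structure_py : Prop := ∀ (texts : List String), Dom_check_uniform_structure_py texts → Spec_check_uniform_structure_py texts (check_uniform_structure_py texts)

-- ===== LEMMAS AND PROOFS =====

-- Invariant of B's run scan over the tail of the sorted list: given a processed sorted
-- prefix P with prev a ≤-maximum of P, run = count of prev in P, and best an achieved
-- maximum of the counts in P, the scan ends with best an achieved maximum of the counts
-- of the whole sorted list P ++ l.
lemma pv_run_inv (l : List String) : ∀ (P : List String) (best run : Int) (prev : String),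
    (P ++ l).Pairwise (· ≤ ·) →
    prev ∈ P → (∀ x ∈ P, x ≤ prev) → run = (P.count prev : Int) →
    (∃ m ∈ P, best = (P.count m : Int) ∧ ∀ x ∈ P, ((P.count x : Int) ≤ best)) →
    (let st := l.foldl (fun (s : Int × Int × String) w =>
        let run := if w = s.2.2 then s.2.1 + 1 else 1
        let prev := if w = s.2.2 then s.2.2 else w
        (if run > s.1 then run else s.1, run, prev)) (best, run, prev)
     ∃ m ∈ P ++ l, st.1 = ((P ++ l).count m : Int) ∧ ∀ x ∈ P ++ l, ((P ++ l).count x : Int) ≤ st.1) := by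
  induction l with
  | nil =>
    intro P best run prev _ _ _ _ hb
    simpa using hb
  | cons w l' ih =>
    intro P best run prev hpw hprevP hprevMax hrun hb
    obtain ⟨m, hmP, hbm, hub⟩ := hb
    have hpw' : ((P ++ [w]) ++ l').Pairwise (· ≤ ·) := by
      simpa [List.append_assoc] using hpw
    have hcross : ∀ x ∈ P, ∀ y ∈ w :: l', x ≤ y := by
      intro x hx y hy
      exact (List.pairwise_append.mp hpw).2.2 x hx y hy
    simp only [List.foldl_cons]
    by_cases hwp : w = prev
    · -- same run continues
      subst hwp
      have hcount : ((P ++ [w]).count w : Int) = run + 1 := by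
        simp [List.count_append, hrun]
      have hb1 : run + 1 = ((P ++ [w]).count w : Int) := hcount.symm
      have h := ih (P ++ [w]) (if run + 1 > best then run + 1 else best) (run + 1) w hpw'
        (by simp) ?_ hb1 ?_
      · simpa [List.append_assoc] using h
      · intro x hx
        rcases List.mem_append.mp hx with h1 | h1
        · exact hprevMax x h1
        · simp at h1; subst h1; exact le_refl _
      · by_cases hgt : run + 1 > best
        · have hif : (if run + 1 > best then run + 1 else best) = run + 1 := if_pos hgt
          refine ⟨w, by simp, by rw [hif, hcount], ?_⟩
          intro x hx
          simp only [if_pos hgt]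
          by_cases hxw : x = w
          · subst hxw; rw [hcount]
          · have hxP : x ∈ P := by
              rcases List.mem_append.mp hx with h1 | h1
              · exact h1
              · simp at h1; exact absurd h1 hxw
            have : ((P ++ [w]).count x : Int) = (P.count x : Int) := by
              simp [List.count_append, List.count_eq_zero.mpr (fun h => hxw (List.mem_singleton.mp h))]
            rw [this]
            have := hub x hxP
            omega
        · have hmw : m ≠ w := by
            intro h; subst h
            have : best = run := by rw [hbm, hrun]
            omega
          refine ⟨m, List.mem_append.mpr (Or.inl hmP), ?_, ?_⟩
          · simp only [if_neg hgt]
            simp [List.count_append, List.count_eq_zero.mpr (fun h => hmw (List.mem_singleton.mp h)), hbm]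
          · intro x hx
            simp only [if_neg hgt]
            by_cases hxw : x = w
            · subst hxw
              rw [hcount]; omega
            · have hxP : x ∈ P := by
                rcases List.mem_append.mp hx with h1 | h1
                · exact h1
                · simp at h1; exact absurd h1 hxw
              have : ((P ++ [w]).count x : Int) = (P.count x : Int) := by
                simp [List.count_append, List.count_eq_zero.mpr (fun h => hxw (List.mem_singleton.mp h))]
              rw [this]; exact hub x hxP
    · -- new run starts; w cannot occur in P (sortedness)
      have hwnotP : w ∉ P := by
        intro hwP
        have h1 : w ≤ prev := hprevMax w hwP
        have h2 : prev ≤ w := hcross prev hprevP w (by simp)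
        exact hwp (le_antisymm h1 h2)
      simp only [if_neg hwp]
      have hcount : ((P ++ [w]).count w : Int) = 1 := by
        simp [List.count_append, List.count_eq_zero_of_not_mem hwnotP]
      have hbest1 : (1 : Int) ≤ best := by
        rw [hbm]
        have := List.count_pos_iff.mpr hmP
        omega
      have hnot : ¬ ((1 : Int) > best) := by omega
      have h := ih (P ++ [w]) (if (1:Int) > best then 1 else best) 1 w hpw'
        (by simp) ?_ hcount.symm ?_
      · simpa [List.append_assoc] using h
      · intro x hx
        rcases List.mem_append.mp hx with h1 | h1
        · exact le_trans (hprevMax x h1) (hcross prev hprevP w (by simp))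
        · simp at h1; subst h1; exact le_refl _
      · have hmw : m ≠ w := fun h => hwnotP (h ▸ hmP)
        refine ⟨m, List.mem_append.mpr (Or.inl hmP), ?_, ?_⟩
        · simp only [if_neg hnot]
          simp [List.count_append, List.count_eq_zero.mpr (fun h => hmw (List.mem_singleton.mp h)), hbm]
        · intro x hx
          simp only [if_neg hnot]
          by_cases hxw : x = w
          · subst hxw; rw [hcount]; omega
          · have hxP : x ∈ P := by
              rcases List.mem_append.mp hx with h1 | h1
              · exact h1
              · simp at h1; exact absurd h1 hxw
            have : ((P ++ [w]).count x : Int) = (P.count x : Int) := by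
              simp [List.count_append, List.count_eq_zero.mpr (fun h => hxw (List.mem_singleton.mp h))]
            rw [this]; exact hub x hxP

-- ===== VERDICT =====
set_option maxHeartbeats 1000000 in
theorem check_uniform_structure_py_spec : Claim_equal_check_uniform_structure_py := by
  intro texts _
  unfold Spec_check_uniform_structure_py check_uniform_structure_py check_uniform_structure_py_alt
  by_cases hlen : texts.length < 2
  · simp [hlen]
  · simp only [if_neg hlen]
    set S := texts.foldl (fun acc t =>
      match PySem.Str.split₀ (PySem.Str.strip t) with
      | [] => acc
      | w :: _ => acc ++ [PySem.Str.lower w]) ([] : List String) with hS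
    cases hsorted : PySem.List.sorted S (fun x => x) false with
    | nil =>
      have hSnil : S = [] := (PySem.List.sorted_eq_nil_iff S (fun x => x) false).mp hsorted
      simp [hSnil]
    | cons p rest =>
      have hperm : (p :: rest).Perm S := hsorted ▸ PySem.List.sorted_perm S (fun x => x) false
      have hSne : ¬ S.isEmpty := by
        simp only [List.isEmpty_iff]
        intro h
        rw [h] at hperm
        exact absurd hperm.length_eq (by simp)
      simp only [hSne, Bool.false_eq_true, if_false]
      have hpw : ((p :: rest)).Pairwise (fun a b => a ≤ b) := by
        have := PySem.List.sorted_pairwise S (fun x => x)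
        rw [hsorted] at this
        simpa using this
      have hinv := pv_run_inv rest [p] 1 1 p (by simpa using hpw) (by simp)
        (by intro x hx; simp at hx; subst hx; exact le_refl _) (by simp)
        ⟨p, by simp, by simp, by intro x hx; simp at hx; subst hx; simp⟩
      simp only [List.cons_append, List.nil_append] at hinv
      obtain ⟨mB, hmB, hbB, hubB⟩ := hinv
      cases hmax : PySem.List.max? (PySem.Set.ofList S) (fun w => (S.count w : Int)) with
      | none =>
        exfalso
        have hnil := (PySem.List.max?_eq_none_iff (xs := PySem.Set.ofList S)
          (key := fun w => (S.count w : Int))).mp hmax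
        have hpS : p ∈ S := hperm.mem_iff.mp (by simp)
        have : p ∈ PySem.Set.ofList S := (PySem.Set.mem_ofList S p).mpr hpS
        simp_all
      | some mA =>
        have hmemA : mA ∈ S := (PySem.Set.mem_ofList S mA).mp (PySem.List.max?_mem hmax)
        have hmaxA := PySem.List.max?_isMax hmax
        -- both counts equal the maximum multiplicity in S
        have hcB : ∀ x, (p :: rest).count x = S.count x := fun x => hperm.count_eq x
        have hlenB : (p :: rest).length = S.length := hperm.length_eq
        have hA_le : (S.count mA : Int) ≤
            (rest.foldl (fun (s : Int × Int × String) w =>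
              let run := if w = s.2.2 then s.2.1 + 1 else 1
              let prev := if w = s.2.2 then s.2.2 else w
              (if run > s.1 then run else s.1, run, prev)) (1, 1, p)).1 := by
          have := hubB mA (hperm.mem_iff.mpr hmemA)
          rwa [hcB mA] at this
        have hB_le :
            (rest.foldl (fun (s : Int × Int × String) w =>
              let run := if w = s.2.2 then s.2.1 + 1 else 1
              let prev := if w = s.2.2 then s.2.2 else w
              (if run > s.1 then run else s.1, run, prev)) (1, 1, p)).1 ≤ (S.count mA : Int) := by
          rw [hbB, hcB mB]
          exact hmaxA mB ((PySem.Set.mem_ofList S mB).mpr (hperm.mem_iff.mp hmB))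
        have heq := le_antisymm hB_le hA_le
        show decide ((S.count mA : Int) * 2 > (S.length : Int)) =
          decide ((rest.foldl (fun (s : Int × Int × String) w =>
              let run := if w = s.2.2 then s.2.1 + 1 else 1
              let prev := if w = s.2.2 then s.2.2 else w
              (if run > s.1 then run else s.1, run, prev)) (1, 1, p)).1 * 2 > ((p :: rest).length : Int))
        rw [← heq, ← hlenB]
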